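-- pv_equiv track=rewrite | github.com/teja-787/ipl_scheduler | scheduler/days.py | schedule_time
-- ===== SOURCE A (Python) =====
-- def schedule_time(days):
--     """
--     Assign time slots:
--     - Weekdays: always 7:30 pm
--     - First match on weekend: 3:30 pm, second: 7:30 pm
--     """
--     times = []
--     for i, day in enumerate(days):
--         if day in (6, 7):
--             if i == 0 or days[i - 1] != day:
--                 times.append("3:30 pm")
--             else:
--                 times.append("7:30 pm")
--         else:
--             times.append("7:30 pm")
--     return times
-- ===== SOURCE B (Python) =====
-- from itertools import groupby
--
-- def schedule_time(days):
--     """Run-based reformulation: group consecutive equal days; a weekend run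
--     gets '3:30 pm' for its first match and '7:30 pm' for the rest; every
--     weekday match gets '7:30 pm'."""
--     times = []
--     for key, grp in groupby(days):
--         n = sum(1 for _ in grp)
--         if key in (6, 7):
--             times.append("3:30 pm")
--             times.extend(["7:30 pm"] * (n - 1))
--         else:
--             times.extend(["7:30 pm"] * n)
--     return times
-- ===== Notes on version B (the rewrite author's own statement) =====
-- stated objective: alternative
-- what changed: Replaces the per-index loop with its days[i-1] lookback by an itertools.groupby pass over maximal runs of equal days, emitting one slot list per run.
import Mathlib
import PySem

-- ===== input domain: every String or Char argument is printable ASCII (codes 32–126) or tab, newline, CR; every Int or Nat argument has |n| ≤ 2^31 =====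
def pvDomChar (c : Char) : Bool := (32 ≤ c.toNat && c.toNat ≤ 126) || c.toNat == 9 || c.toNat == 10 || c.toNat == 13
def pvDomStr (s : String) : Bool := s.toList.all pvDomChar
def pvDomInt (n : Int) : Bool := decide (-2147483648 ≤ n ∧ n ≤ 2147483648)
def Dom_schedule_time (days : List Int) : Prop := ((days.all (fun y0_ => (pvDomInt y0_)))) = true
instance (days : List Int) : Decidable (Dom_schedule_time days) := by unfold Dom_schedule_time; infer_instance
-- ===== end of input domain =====

-- B replaces A's per-index loop (with its days[i-1] lookback) by a groupby-style pass
-- over maximal runs of equal days; alternative decomposition, same cost.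

-- ===== PORT A =====
-- for i, day in enumerate(days): append one slot per element, looking back at days[i-1]
def schedule_time (days : List Int) : List String :=
  (PySem.List.enumerate days).foldl
    (fun times (p : Int × Int) =>
      let i := p.1; let day := p.2
      if day = 6 ∨ day = 7 then
        if i = 0 ∨ PySem.List.pyGet? days (i - 1) ≠ some day then
          times ++ ["3:30 pm"]
        else
          times ++ ["7:30 pm"]
      else
        times ++ ["7:30 pm"]) []

-- ===== PORT B =====
-- groupby(days): peel off the maximal run of the leading value, emit its slots, recurse.
def schedule_time_alt (days : List Int) : List String :=
  match days with
  | [] => []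
  | key :: rest =>
    let grp := rest.takeWhile (fun x => x == key)
    let rest' := rest.dropWhile (fun x => x == key)
    let n := grp.length + 1
    (if key = 6 ∨ key = 7 then
       "3:30 pm" :: List.replicate (n - 1) "7:30 pm"
     else
       List.replicate n "7:30 pm") ++ schedule_time_alt rest'
termination_by days.length
decreasing_by
  have := List.length_dropWhile_le (p := fun x => x == key) (l := rest)
  simp only [List.length_cons]
  omega

-- ===== PRECONDITION & SPEC =====
def Spec_schedule_time (days : List Int) (out : List String) : Prop := out = schedule_time_alt days
instance (days : List Int) (out : List String) : Decidable (Spec_schedule_time days out) := by unfold Spec_schedule_time; infer_instance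

-- ===== CLAIM (what is proved, stated in full; the proofs are below) =====
def Claim_equal_schedule_time : Prop := ∀ (days : List Int), Dom_schedule_time days → Spec_schedule_time days (schedule_time days)

-- ===== LEMMAS AND PROOFS =====

-- reference recursion: one slot per day, carrying the previous day
def pvGo : Option Int → List Int → List String
  | _, [] => []
  | prev, d :: rest =>
    (if (d = 6 ∨ d = 7) ∧ prev ≠ some d then "3:30 pm" else "7:30 pm") :: pvGo (some d) rest

theorem pvFoldl_append_singleton {α β : Type} (g : α → β) :
    ∀ (l : List α) (acc : List β),
      l.foldl (fun ts x => ts ++ [g x]) acc = acc ++ l.map g := by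
  intro l
  induction l with
  | nil => intro acc; simp
  | cons x tl ih => intro acc; simp [List.foldl, ih]

theorem pvA_body (days : List Int) :
    (fun times (p : Int × Int) =>
      let i := p.1; let day := p.2
      if day = 6 ∨ day = 7 then
        if i = 0 ∨ PySem.List.pyGet? days (i - 1) ≠ some day then
          times ++ ["3:30 pm"]
        else
          times ++ ["7:30 pm"]
      else
        times ++ ["7:30 pm"])
    = (fun (times : List String) (p : Int × Int) =>
        times ++ [if (p.2 = 6 ∨ p.2 = 7) ∧ (p.1 = 0 ∨ PySem.List.pyGet? days (p.1 - 1) ≠ some p.2)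
          then "3:30 pm" else "7:30 pm"]) := by
  funext times p
  obtain ⟨i, day⟩ := p
  by_cases h1 : day = 6 ∨ day = 7 <;>
    by_cases h2 : i = 0 ∨ PySem.List.pyGet? days (i - 1) ≠ some day <;>
    simp [h1, h2]

theorem pvA_main :
    ∀ (rest pre : List Int),
      (PySem.List.enumerate rest (pre.length : Int)).map
        (fun (p : Int × Int) =>
          if (p.2 = 6 ∨ p.2 = 7) ∧ (p.1 = 0 ∨ PySem.List.pyGet? (pre ++ rest) (p.1 - 1) ≠ some p.2)
          then "3:30 pm" else "7:30 pm")
      = pvGo pre.getLast? rest := by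
  intro rest
  induction rest with
  | nil => intro pre; simp [PySem.List.enumerate_nil, pvGo]
  | cons day tl ih =>
    intro pre
    rw [PySem.List.enumerate_cons, List.map_cons]
    have hcond : ((pre.length : Int) = 0 ∨
        PySem.List.pyGet? (pre ++ day :: tl) ((pre.length : Int) - 1) ≠ some day)
        ↔ pre.getLast? ≠ some day := by
      rcases List.eq_nil_or_concat pre with h | ⟨init, lastel, h⟩
      · subst h; simp
      · subst h
        simp only [List.concat_eq_append]
        have hlen : ((init ++ [lastel]).length : Int) - 1 = (init.length : Int) := by
          simp
        have hget : PySem.List.pyGet? ((init ++ [lastel]) ++ day :: tl) ((init.length : Int))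
            = some lastel := by
          simp [PySem.List.pyGet?_append_length]
        rw [hlen, hget, List.getLast?_concat]
        have hpos : ((init ++ [lastel]).length : Int) ≠ 0 := by
          simp
          omega
        constructor
        · rintro (h | h)
          · exact absurd h hpos
          · exact h
        · intro h
          exact Or.inr h
    have htl := ih (pre ++ [day])
    have hlen2 : ((pre ++ [day]).length : Int) = (pre.length : Int) + 1 := by simp
    rw [hlen2] at htl
    have hassoc : (pre ++ [day]) ++ tl = pre ++ day :: tl := by simp
    rw [hassoc] at htl
    have hlast : (pre ++ [day]).getLast? = some day := List.getLast?_concat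
    rw [hlast] at htl
    rw [htl]
    show (if (day = 6 ∨ day = 7) ∧ _ then _ else _) :: _ = pvGo pre.getLast? (day :: tl)
    simp only [pvGo]
    congr 1
    by_cases h1 : day = 6 ∨ day = 7
    · by_cases h2 : pre.getLast? ≠ some day
      · rw [if_pos ⟨h1, hcond.mpr h2⟩, if_pos ⟨h1, h2⟩]
      · rw [if_neg, if_neg]
        · exact fun h => h2 h.2
        · exact fun h => h2 (hcond.mp h.2)
    · rw [if_neg (fun h => h1 h.1), if_neg (fun h => h1 h.1)]

theorem pvA_eq_go (days : List Int) : schedule_time days = pvGo none days := by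
  unfold schedule_time
  rw [pvA_body days,
    pvFoldl_append_singleton
      (g := fun (p : Int × Int) =>
        if (p.2 = 6 ∨ p.2 = 7) ∧ (p.1 = 0 ∨ PySem.List.pyGet? days (p.1 - 1) ≠ some p.2)
        then "3:30 pm" else "7:30 pm")
      (PySem.List.enumerate days) []]
  have := pvA_main days []
  simpa using this

theorem pvGo_run (key : Int) (rest' : List Int) :
    ∀ grp : List Int, (∀ x ∈ grp, x = key) →
      pvGo (some key) (grp ++ rest')
        = List.replicate grp.length "7:30 pm" ++ pvGo (some key) rest' := by
  intro grp
  induction grp with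
  | nil => intro _; simp
  | cons x tl ih =>
    intro h
    have hx : x = key := h x (by simp)
    subst hx
    have : ((x = 6 ∨ x = 7) ∧ some x ≠ some x) = False := by simp
    simp only [List.cons_append, pvGo, this, if_false, List.length_cons,
      List.replicate_succ, List.cons_append]
    rw [ih (fun y hy => h y (by simp [hy]))]

theorem pvHead_dropWhile {α : Type} (p : α → Bool) :
    ∀ (l : List α) (d : α), (l.dropWhile p).head? = some d → p d = false := by
  intro l
  induction l with
  | nil => intro d h; simp [List.dropWhile] at h
  | cons x tl ih =>
    intro d h
    by_cases hp : p x
    · rw [List.dropWhile_cons_of_pos hp] at h; exact ih d h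
    · rw [List.dropWhile_cons_of_neg hp] at h
      simp at h; subst h; simpa using hp

theorem pvB_main :
    ∀ (n : Nat) (days : List Int), days.length ≤ n → ∀ (prev : Option Int),
      (∀ d, days.head? = some d → prev ≠ some d) →
      schedule_time_alt days = pvGo prev days := by
  intro n
  induction n with
  | zero =>
    intro days hlen prev _
    have : days = [] := List.eq_nil_of_length_eq_zero (Nat.le_zero.mp hlen)
    subst this; simp [schedule_time_alt, pvGo]
  | succ m IH =>
    intro days hlen prev hprev
    match days with
    | [] => simp [schedule_time_alt, pvGo]
    | key :: rest =>
      have hne : prev ≠ some key := hprev key (by simp)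
      rw [schedule_time_alt]
      have hsplit : rest = rest.takeWhile (fun x => x == key) ++ rest.dropWhile (fun x => x == key) :=
        (List.takeWhile_append_dropWhile).symm
      have hgrp : ∀ x ∈ rest.takeWhile (fun x => x == key), x = key := by
        intro x hx
        exact eq_of_beq (List.mem_takeWhile_imp (p := fun x => x == key) (l := rest) hx)
      have hle : (rest.dropWhile (fun x => x == key)).length ≤ m := by
        have := List.length_dropWhile_le (p := fun x => x == key) (l := rest)
        simp at hlen; omega
      have hhd : ∀ d, (rest.dropWhile (fun x => x == key)).head? = some d → some key ≠ some d := by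
        intro d hd hc
        have hfalse := pvHead_dropWhile (fun x => x == key) rest d hd
        have : d = key := by injection hc with h; exact h.symm
        subst this
        simp at hfalse
      have hrec := IH (rest.dropWhile (fun x => x == key)) hle (some key) hhd
      conv_rhs => rw [show (key :: rest) = key :: (rest.takeWhile (fun x => x == key)
        ++ rest.dropWhile (fun x => x == key)) from by rw [← hsplit]]
      rw [pvGo]
      rw [pvGo_run key _ _ hgrp, ← hrec]
      by_cases h1 : key = 6 ∨ key = 7
      · rw [if_pos h1, if_pos ⟨h1, hne⟩]
        simp
      · rw [if_neg h1, if_neg (fun h => h1 h.1)]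
        simp [List.replicate_succ]

-- ===== VERDICT (by name: the statement is the Claim_ definition above) =====
theorem schedule_time_spec : Claim_equal_schedule_time := by
  intro days _
  unfold Spec_schedule_time
  rw [pvA_eq_go, pvB_main days.length days le_rfl none (fun d _ => by simp)]
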